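-- pv_equiv track=rewrite | github.com/ronggong/phoneticSimilarity | baselineHelper.py | identifyInsertionDeletionIdx
-- ===== SOURCE A (Python) =====
-- def identifyInsertionDeletionIdx(phns_teacher_letters, phns_student_letters, dict_letters2syl):
--     """
--     identify which index in teacher's phone list is a deletion
--     which index in student's phone list is a insertion
--     the dictionary map student phone list index to teacher's phone
--
--     Example:
--     teacher phone list cd-cdc
--     student phone list cdlc-c
--
--     The 3rd phone of student is a insertion, the 4th phone of teacher is a deletion
--     the corresponding dictionary is {0: c, 1, d, 3: c, 4:c}
--
--     :param phns_teacher_letters: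
--     :param phns_student_letters:
--     :param dict_letters2syl:
--     :return:
--     """
--     ii_teacher, ii_student = 0, 0
--     insertion_indices, deletion_indices = [], []
--     dict_student_idx_2_teacher_phn = {}
--     teacher_student_indices_pair = [] # the indices corresponded between teacher and student phone lists
--
--     for ii in range(len(phns_teacher_letters)):
--         if phns_teacher_letters[ii] != '-' and phns_student_letters[ii] != '-':
--             dict_student_idx_2_teacher_phn[ii_student] = dict_letters2syl[phns_teacher_letters[ii]]
--             teacher_student_indices_pair.append([ii_teacher, ii_student])
--             ii_teacher += 1
--             ii_student += 1
--         else: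
--             if phns_teacher_letters[ii] == '-':
--                 insertion_indices.append(ii_student)
--             elif phns_student_letters[ii] == '-':
--                 deletion_indices.append(ii_teacher)
--
--             if phns_teacher_letters[ii] != '-':
--                 ii_teacher += 1
--             if phns_student_letters[ii] != '-':
--                 ii_student += 1
--
--     return dict_student_idx_2_teacher_phn, insertion_indices, deletion_indices, teacher_student_indices_pair
-- ===== SOURCE B (Python) =====
-- def identifyInsertionDeletionIdx(phns_teacher_letters, phns_student_letters, dict_letters2syl):
--     n = len(phns_teacher_letters)
--     aligned = list(zip(phns_teacher_letters, phns_student_letters[:n]))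
--     # index table: running teacher/student indices at each aligned position
--     t_idx, s_idx = [], []
--     ii_teacher = ii_student = 0
--     for t, s in aligned:
--         t_idx.append(ii_teacher)
--         s_idx.append(ii_student)
--         ii_teacher += (1 if t != '-' else 0)
--         ii_student += (1 if s != '-' else 0)
--     rows = list(zip(aligned, t_idx, s_idx))
--     dict_student_idx_2_teacher_phn = {
--         si: dict_letters2syl[t] for (t, s), ti, si in rows if t != '-' and s != '-'}
--     teacher_student_indices_pair = [
--         [ti, si] for (t, s), ti, si in rows if t != '-' and s != '-']
--     insertion_indices = [si for (t, s), ti, si in rows if t == '-']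
--     deletion_indices = [ti for (t, s), ti, si in rows if t != '-' and s == '-']
--     return dict_student_idx_2_teacher_phn, insertion_indices, deletion_indices, teacher_student_indices_pair
-- ===== Notes on version B (the rewrite author's own statement) =====
-- stated objective: alternative
-- what changed: Replaces A's single fused loop threading two counters and four accumulators with a precomputed running-index table (teacher/student indices per aligned position) followed by four independent filtered passes, one per output.
import Mathlib
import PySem

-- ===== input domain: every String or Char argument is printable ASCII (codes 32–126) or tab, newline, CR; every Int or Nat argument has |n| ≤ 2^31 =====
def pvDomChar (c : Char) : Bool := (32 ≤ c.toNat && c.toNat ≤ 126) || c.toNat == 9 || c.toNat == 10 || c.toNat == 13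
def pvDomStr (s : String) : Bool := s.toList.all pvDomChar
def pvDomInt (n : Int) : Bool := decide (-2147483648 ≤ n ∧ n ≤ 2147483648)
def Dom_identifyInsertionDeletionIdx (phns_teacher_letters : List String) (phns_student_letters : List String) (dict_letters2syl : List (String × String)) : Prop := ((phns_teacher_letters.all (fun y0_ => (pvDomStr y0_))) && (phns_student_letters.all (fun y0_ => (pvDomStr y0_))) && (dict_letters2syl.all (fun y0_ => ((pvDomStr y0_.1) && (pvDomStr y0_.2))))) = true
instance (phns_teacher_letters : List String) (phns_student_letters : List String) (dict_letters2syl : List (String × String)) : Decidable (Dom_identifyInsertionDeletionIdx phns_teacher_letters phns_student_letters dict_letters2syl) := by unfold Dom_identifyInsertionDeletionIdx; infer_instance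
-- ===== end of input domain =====

-- B replaces A's fused counter-threading loop by a precomputed running-index table plus four
-- independent filtered passes (one per output); same cost, different decomposition.

-- shared primitive: Python dict subscript on the dict PARAMETER (assoc list, first match; "" only where Python would raise KeyError, excluded by Pre_)
def pvLookup (d : List (String × String)) (k : String) : String :=
  ((d.find? (fun q => q.1 == k)).map (fun q => q.2)).getD ""

-- ===== PORT A =====
def identifyInsertionDeletionIdx (phns_teacher_letters : List String) (phns_student_letters : List String) (dict_letters2syl : List (String × String)) : (List (Int × String)) × List Int × List Int × List (List Int) :=
  let res := (PySem.List.pyRange 0 (phns_teacher_letters.length : Int) 1).foldl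
    (fun (acc : Int × Int × PySem.Dict Int String × List Int × List Int × List (List Int)) ii =>
      let tl := PySem.List.pyGetD phns_teacher_letters ii ""
      let sl := PySem.List.pyGetD phns_student_letters ii ""
      if tl ≠ "-" ∧ sl ≠ "-" then
        (acc.1 + 1, acc.2.1 + 1,
         acc.2.2.1.insert acc.2.1 (pvLookup dict_letters2syl tl),
         acc.2.2.2.1, acc.2.2.2.2.1,
         acc.2.2.2.2.2 ++ [[acc.1, acc.2.1]])
      else
        (acc.1 + (if tl ≠ "-" then 1 else 0),
         acc.2.1 + (if sl ≠ "-" then 1 else 0),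
         acc.2.2.1,
         if tl = "-" then acc.2.2.2.1 ++ [acc.2.1] else acc.2.2.2.1,
         if tl ≠ "-" ∧ sl = "-" then acc.2.2.2.2.1 ++ [acc.1] else acc.2.2.2.2.1,
         acc.2.2.2.2.2))
    (0, 0, PySem.Dict.empty, [], [], [])
  (res.2.2.1.items, res.2.2.2.1, res.2.2.2.2.1, res.2.2.2.2.2)

-- ===== PORT B =====
def identifyInsertionDeletionIdx_alt (phns_teacher_letters : List String) (phns_student_letters : List String) (dict_letters2syl : List (String × String)) : (List (Int × String)) × List Int × List Int × List (List Int) :=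
  let n := phns_teacher_letters.length
  let aligned := phns_teacher_letters.zip (phns_student_letters.take n)
  let st := aligned.foldl
    (fun (p : List Int × List Int × Int × Int) r =>
      (p.1 ++ [p.2.2.1], p.2.1 ++ [p.2.2.2],
       p.2.2.1 + (if r.1 ≠ "-" then 1 else 0),
       p.2.2.2 + (if r.2 ≠ "-" then 1 else 0)))
    ([], [], 0, 0)
  let rows := aligned.zip (st.1.zip st.2.1)
  let d := (rows.filter (fun r => decide (r.1.1 ≠ "-" ∧ r.1.2 ≠ "-"))).foldl
    (fun d r => d.insert r.2.2 (pvLookup dict_letters2syl r.1.1)) (PySem.Dict.empty : PySem.Dict Int String)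
  (d.items,
   (rows.filter (fun r => decide (r.1.1 = "-"))).map (fun r => r.2.2),
   (rows.filter (fun r => decide (r.1.1 ≠ "-" ∧ r.1.2 = "-"))).map (fun r => r.2.1),
   (rows.filter (fun r => decide (r.1.1 ≠ "-" ∧ r.1.2 ≠ "-"))).map (fun r => [r.2.1, r.2.2]))

-- ===== PRECONDITION & SPEC =====
-- Pre_ excludes exactly the inputs where Python A raises: IndexError when the student list is
-- shorter than the teacher list, KeyError when a matched teacher letter is missing from the dict.
def Pre_identifyInsertionDeletionIdx (phns_teacher_letters : List String) (phns_student_letters : List String) (dict_letters2syl : List (String × String)) : Prop :=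
  phns_teacher_letters.length ≤ phns_student_letters.length ∧
  ∀ p ∈ phns_teacher_letters.zip phns_student_letters,
    p.1 ≠ "-" → p.2 ≠ "-" → (dict_letters2syl.find? (fun q => q.1 == p.1)).isSome = true
instance (phns_teacher_letters : List String) (phns_student_letters : List String) (dict_letters2syl : List (String × String)) : Decidable (Pre_identifyInsertionDeletionIdx phns_teacher_letters phns_student_letters dict_letters2syl) := by unfold Pre_identifyInsertionDeletionIdx; infer_instance

def pvWitness_identifyInsertionDeletionIdx : List String × List String × (List (String × String)) :=
  (["a", "-", "b", "c"], ["a", "c", "-", "c"], [("a", "A1"), ("b", "B1"), ("c", "C1")])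

def Spec_identifyInsertionDeletionIdx (phns_teacher_letters : List String) (phns_student_letters : List String) (dict_letters2syl : List (String × String)) (out : (List (Int × String)) × List Int × List Int × List (List Int)) : Prop := out = identifyInsertionDeletionIdx_alt phns_teacher_letters phns_student_letters dict_letters2syl
instance (phns_teacher_letters : List String) (phns_student_letters : List String) (dict_letters2syl : List (String × String)) (out : (List (Int × String)) × List Int × List Int × List (List Int)) : Decidable (Spec_identifyInsertionDeletionIdx phns_teacher_letters phns_student_letters dict_letters2syl out) := by unfold Spec_identifyInsertionDeletionIdx; infer_instance

-- ===== CLAIM (what is proved, stated in full; the proofs are below) =====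
def Claim_equal_identifyInsertionDeletionIdx : Prop := ∀ (phns_teacher_letters : List String) (phns_student_letters : List String) (dict_letters2syl : List (String × String)), Dom_identifyInsertionDeletionIdx phns_teacher_letters phns_student_letters dict_letters2syl → Pre_identifyInsertionDeletionIdx phns_teacher_letters phns_student_letters dict_letters2syl → Spec_identifyInsertionDeletionIdx phns_teacher_letters phns_student_letters dict_letters2syl (identifyInsertionDeletionIdx phns_teacher_letters phns_student_letters dict_letters2syl)

-- ===== LEMMAS AND PROOFS =====

-- row table: (aligned pair, running teacher index, running student index) per position
def pvRowsR : List (String × String) → Int → Int → List ((String × String) × Int × Int)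
  | [], _, _ => []
  | r :: L, ct, cs =>
      (r, ct, cs) :: pvRowsR L (ct + (if r.1 ≠ "-" then 1 else 0)) (cs + (if r.2 ≠ "-" then 1 else 0))

def pvTcnt : List (String × String) → Int
  | [] => 0
  | r :: L => (if r.1 ≠ "-" then 1 else 0) + pvTcnt L

def pvScnt : List (String × String) → Int
  | [] => 0
  | r :: L => (if r.2 ≠ "-" then 1 else 0) + pvScnt L

-- A's loop body as a function of the aligned pair
def pvStepZ (dict : List (String × String)) (acc : Int × Int × PySem.Dict Int String × List Int × List Int × List (List Int)) (r : String × String) : Int × Int × PySem.Dict Int String × List Int × List Int × List (List Int) :=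
  if r.1 ≠ "-" ∧ r.2 ≠ "-" then
    (acc.1 + 1, acc.2.1 + 1,
     acc.2.2.1.insert acc.2.1 (pvLookup dict r.1),
     acc.2.2.2.1, acc.2.2.2.2.1,
     acc.2.2.2.2.2 ++ [[acc.1, acc.2.1]])
  else
    (acc.1 + (if r.1 ≠ "-" then 1 else 0),
     acc.2.1 + (if r.2 ≠ "-" then 1 else 0),
     acc.2.2.1,
     if r.1 = "-" then acc.2.2.2.1 ++ [acc.2.1] else acc.2.2.2.1,
     if r.1 ≠ "-" ∧ r.2 = "-" then acc.2.2.2.2.1 ++ [acc.1] else acc.2.2.2.2.1,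
     acc.2.2.2.2.2)

-- A's fold, rephrased over the aligned list, fully described by the row table
lemma pvMainA (dict : List (String × String)) (L : List (String × String)) : ∀ (ct cs : Int) (d : PySem.Dict Int String) (ins del : List Int) (pr : List (List Int)),
    L.foldl (pvStepZ dict) (ct, cs, d, ins, del, pr) =
      (ct + pvTcnt L, cs + pvScnt L,
       ((pvRowsR L ct cs).filter (fun r => decide (r.1.1 ≠ "-" ∧ r.1.2 ≠ "-"))).foldl
         (fun d r => d.insert r.2.2 (pvLookup dict r.1.1)) d,
       ins ++ ((pvRowsR L ct cs).filter (fun r => decide (r.1.1 = "-"))).map (fun r => r.2.2),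
       del ++ ((pvRowsR L ct cs).filter (fun r => decide (r.1.1 ≠ "-" ∧ r.1.2 = "-"))).map (fun r => r.2.1),
       pr ++ ((pvRowsR L ct cs).filter (fun r => decide (r.1.1 ≠ "-" ∧ r.1.2 ≠ "-"))).map (fun r => [r.2.1, r.2.2])) := by
  induction L with
  | nil => intro ct cs d ins del pr; simp [pvRowsR, pvTcnt, pvScnt]
  | cons r L ih =>
    intro ct cs d ins del pr
    by_cases h1 : r.1 = "-" <;> by_cases h2 : r.2 = "-" <;>
      simp [pvRowsR, pvTcnt, pvScnt, pvStepZ, h1, h2, List.foldl_cons, ih] <;> (try ring_nf) <;> (try exact ⟨trivial, trivial⟩)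

lemma pvGetZip (t s : List String) (ii : Int) (h0 : 0 ≤ ii) (hi : ii < (t.length : Int)) (hle : t.length ≤ s.length) :
    PySem.List.pyGetD (t.zip (s.take t.length)) ii ("", "") =
      (PySem.List.pyGetD t ii "", PySem.List.pyGetD s ii "") := by
  have hlen : (t.zip (s.take t.length)).length = t.length := by
    simp [List.length_zip]; omega
  have hiN : ii.toNat < t.length := by omega
  rw [PySem.List.pyGetD_eq_getElem (t.zip (s.take t.length)) ("", "") h0 (by rw [hlen]; exact_mod_cast hi),
      PySem.List.pyGetD_eq_getElem t "" h0 hi,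
      PySem.List.pyGetD_eq_getElem s "" h0 (by omega)]
  simp [List.getElem_zip, List.getElem_take]

lemma pvFold4 (L : List (String × String)) : ∀ (a b : List Int) (ct cs : Int),
    L.foldl (fun (p : List Int × List Int × Int × Int) r =>
        (p.1 ++ [p.2.2.1], p.2.1 ++ [p.2.2.2],
         p.2.2.1 + (if r.1 ≠ "-" then 1 else 0),
         p.2.2.2 + (if r.2 ≠ "-" then 1 else 0))) (a, b, ct, cs)
      = (a ++ (pvRowsR L ct cs).map (fun r => r.2.1),
         b ++ (pvRowsR L ct cs).map (fun r => r.2.2),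
         ct + pvTcnt L, cs + pvScnt L) := by
  induction L with
  | nil => intro a b ct cs; simp [pvRowsR, pvTcnt, pvScnt]
  | cons r L ih =>
    intro a b ct cs
    simp only [List.foldl_cons]
    rw [ih]
    simp [pvRowsR, pvTcnt, pvScnt]
    constructor <;> ring

lemma pvZipRows (L : List (String × String)) : ∀ (ct cs : Int),
    L.zip (((pvRowsR L ct cs).map (fun r => r.2.1)).zip ((pvRowsR L ct cs).map (fun r => r.2.2)))
      = pvRowsR L ct cs := by
  induction L with
  | nil => intro ct cs; simp [pvRowsR]
  | cons r L ih => intro ct cs; simp [pvRowsR, ih]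

-- ===== VERDICT (by name: the statement is the Claim_ definition above) =====
theorem identifyInsertionDeletionIdx_spec : Claim_equal_identifyInsertionDeletionIdx := by
  intro t s dict _hdom hpre
  obtain ⟨hle, -⟩ := hpre
  unfold Spec_identifyInsertionDeletionIdx identifyInsertionDeletionIdx identifyInsertionDeletionIdx_alt
  simp only []
  have hlen : (t.zip (s.take t.length)).length = t.length := by
    simp [List.length_zip]; omega
  have hA : (PySem.List.pyRange 0 (t.length : Int) 1).foldl
      (fun (acc : Int × Int × PySem.Dict Int String × List Int × List Int × List (List Int)) ii =>
        let tl := PySem.List.pyGetD t ii ""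
        let sl := PySem.List.pyGetD s ii ""
        if tl ≠ "-" ∧ sl ≠ "-" then
          (acc.1 + 1, acc.2.1 + 1,
           acc.2.2.1.insert acc.2.1 (pvLookup dict tl),
           acc.2.2.2.1, acc.2.2.2.2.1,
           acc.2.2.2.2.2 ++ [[acc.1, acc.2.1]])
        else
          (acc.1 + (if tl ≠ "-" then 1 else 0),
           acc.2.1 + (if sl ≠ "-" then 1 else 0),
           acc.2.2.1,
           if tl = "-" then acc.2.2.2.1 ++ [acc.2.1] else acc.2.2.2.1,
           if tl ≠ "-" ∧ sl = "-" then acc.2.2.2.2.1 ++ [acc.1] else acc.2.2.2.2.1,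
           acc.2.2.2.2.2))
      (0, 0, PySem.Dict.empty, [], [], [])
      = (t.zip (s.take t.length)).foldl (pvStepZ dict) (0, 0, PySem.Dict.empty, [], [], []) := by
    rw [show (t.length : Int) = ((t.zip (s.take t.length)).length : Int) by rw [hlen]]
    rw [PySem.List.foldl_congr_mem (g := fun acc j => pvStepZ dict acc (PySem.List.pyGetD (t.zip (s.take t.length)) j ("", "")))]
    · exact PySem.List.foldl_pyRange_zero_pyGetD' (t.zip (s.take t.length)) ("", "") (pvStepZ dict) _
    · intro acc x hx
      rw [PySem.List.mem_pyRange_one] at hx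
      rw [pvGetZip t s x hx.1 (by rw [← hlen]; exact_mod_cast hx.2) hle]
      simp [pvStepZ]
  rw [hA, pvMainA dict (t.zip (s.take t.length)) 0 0 PySem.Dict.empty [] [] [],
      pvFold4 (t.zip (s.take t.length)) [] [] 0 0]
  simp [pvZipRows]
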